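-- pv_equiv track=rewrite | github.com/xupStudio/pawcorder | admin/app/nas_mount.py | _strip_existing_pawcorder_lines
-- ===== SOURCE A (Python) =====
-- FSTAB_MARKER = "# pawcorder-nas-mount"
--
-- def _strip_existing_pawcorder_lines(fstab_text: str) -> str:
--     """Remove any prior pawcorder-managed mount lines so we can
--     re-write idempotently."""
--     out: list[str] = []
--     skip_next = False
--     for line in fstab_text.splitlines():
--         if FSTAB_MARKER in line:
--             skip_next = True
--             continue
--         if skip_next:
--             skip_next = False
--             continue
--         out.append(line)
--     return "\n".join(out)
-- ===== SOURCE B (Python) =====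
-- FSTAB_MARKER = "# pawcorder-nas-mount"
--
-- def _strip_existing_pawcorder_lines(fstab_text: str) -> str:
--     """Two-pass version: precompute the set of line indices to drop
--     (each marker line and the line after it), then filter by index."""
--     lines = fstab_text.splitlines()
--     drop = set()
--     for i, line in enumerate(lines):
--         if FSTAB_MARKER in line:
--             drop.add(i)
--             drop.add(i + 1)
--     return "\n".join(line for i, line in enumerate(lines) if i not in drop)
-- ===== Notes on version B (the rewrite author's own statement) =====
-- stated objective: alternative
-- what changed: Replaces the stateful skip_next forward scan with two passes: first build a set of indices to drop ({i, i+1} for every marker line), then rebuild the output by filtering lines on index membership.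
import Mathlib
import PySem

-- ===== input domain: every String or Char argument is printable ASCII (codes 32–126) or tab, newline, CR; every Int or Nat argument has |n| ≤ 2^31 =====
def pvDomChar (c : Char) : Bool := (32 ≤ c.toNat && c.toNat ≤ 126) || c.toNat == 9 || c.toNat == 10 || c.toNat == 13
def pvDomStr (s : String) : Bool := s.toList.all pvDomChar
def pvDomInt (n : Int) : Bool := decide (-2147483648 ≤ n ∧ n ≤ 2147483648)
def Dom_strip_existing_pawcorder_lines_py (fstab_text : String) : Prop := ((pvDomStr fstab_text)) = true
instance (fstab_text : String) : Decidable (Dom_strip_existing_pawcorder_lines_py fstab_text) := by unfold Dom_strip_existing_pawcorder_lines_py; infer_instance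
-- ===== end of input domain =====

-- B replaces A's stateful skip_next scan by two passes: a precomputed drop-index set, then an index filter (alternative decomposition, same cost).

def pvFstabMarker : String := "# pawcorder-nas-mount"

-- ===== PORT A =====
-- literal port of A: one pass with (out, skip_next) state
def strip_existing_pawcorder_lines_py (fstab_text : String) : String :=
  let st := (PySem.Str.splitlines fstab_text).foldl
    (fun (st : List String × Bool) line =>
      if PySem.Str.isIn pvFstabMarker line then (st.1, true)
      else if st.2 then (st.1, false)
      else (st.1 ++ [line], false))
    ([], false)
  PySem.Str.join "\n" st.1

-- ===== PORT B =====
-- pass 1 of B: the set of indices to drop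
def pvDropSet (lines : List String) : PySem.Set Int :=
  (PySem.List.enumerate lines).foldl
    (fun (s : PySem.Set Int) p =>
      if PySem.Str.isIn pvFstabMarker p.2 then PySem.Set.add (PySem.Set.add s p.1) (p.1 + 1) else s)
    PySem.Set.empty

-- literal port of B: filter by index membership in the drop set, then join
def strip_existing_pawcorder_lines_py_alt (fstab_text : String) : String :=
  let lines := PySem.Str.splitlines fstab_text
  let drop := pvDropSet lines
  PySem.Str.join "\n"
    (((PySem.List.enumerate lines).filter (fun p => !(PySem.Set.contains drop p.1))).map (·.2))

-- ===== PRECONDITION & SPEC =====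
def Spec_strip_existing_pawcorder_lines_py (fstab_text : String) (out : String) : Prop := out = strip_existing_pawcorder_lines_py_alt fstab_text
instance (fstab_text : String) (out : String) : Decidable (Spec_strip_existing_pawcorder_lines_py fstab_text out) := by unfold Spec_strip_existing_pawcorder_lines_py; infer_instance

-- ===== CLAIM (what is proved, stated in full; the proofs are below) =====
def Claim_equal_strip_existing_pawcorder_lines_py : Prop := ∀ (fstab_text : String), Dom_strip_existing_pawcorder_lines_py fstab_text → Spec_strip_existing_pawcorder_lines_py fstab_text (strip_existing_pawcorder_lines_py fstab_text)

-- ===== LEMMAS AND PROOFS =====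

-- reference recursion: the list of kept lines, given the incoming skip flag
def pvSpecLines (skip : Bool) : List String → List String
  | [] => []
  | l :: t =>
      if PySem.Str.isIn pvFstabMarker l then pvSpecLines true t
      else if skip then pvSpecLines false t
      else l :: pvSpecLines false t

-- A's fold accumulates exactly pvSpecLines
theorem pvA_fold (lines : List String) (acc : List String) (skip : Bool) :
    (lines.foldl
      (fun (st : List String × Bool) line =>
        if PySem.Str.isIn pvFstabMarker line then (st.1, true)
        else if st.2 then (st.1, false)
        else (st.1 ++ [line], false))
      (acc, skip)).1 = acc ++ pvSpecLines skip lines := by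
  induction lines generalizing acc skip with
  | nil => simp [pvSpecLines]
  | cons l t ih =>
      simp only [List.foldl_cons, pvSpecLines]
      by_cases hm : PySem.Str.isIn pvFstabMarker l = true
      · rw [if_pos hm, if_pos hm]; exact ih acc true
      · rw [if_neg hm, if_neg hm]
        cases skip
        · rw [if_neg (by simp), if_neg (by simp)]
          rw [ih]; simp
        · rw [if_pos rfl, if_pos rfl]; exact ih acc false

-- membership in the drop-set fold
theorem pvDrop_mem (lines : List String) (n : Int) (s : PySem.Set Int) (x : Int) :
    x ∈ (PySem.List.enumerate lines n).foldl
      (fun (s : PySem.Set Int) p =>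
        if PySem.Str.isIn pvFstabMarker p.2 then PySem.Set.add (PySem.Set.add s p.1) (p.1 + 1) else s) s
    ↔ x ∈ s ∨ ∃ (k : Nat) (h : k < lines.length),
        PySem.Str.isIn pvFstabMarker lines[k] = true ∧ (x = n + k ∨ x = n + k + 1) := by
  induction lines generalizing n s with
  | nil => simp [PySem.List.enumerate_nil]
  | cons l t ih =>
      rw [PySem.List.enumerate_cons]
      simp only [List.foldl_cons]
      rw [ih]
      by_cases hm : PySem.Str.isIn pvFstabMarker l = true
      · rw [if_pos hm]
        simp only [PySem.Set.mem_add]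
        constructor
        · rintro (((h | h) | h) | ⟨k, hk, hmk, hx⟩)
          · exact Or.inl h
          · exact Or.inr ⟨0, by simp, by simpa using hm, by push_cast; omega⟩
          · exact Or.inr ⟨0, by simp, by simpa using hm, by push_cast; omega⟩
          · refine Or.inr ⟨k + 1, by simp; omega, by simpa using hmk, ?_⟩
            push_cast at hx ⊢; omega
        · rintro (h | ⟨k, hk, hmk, hx⟩)
          · exact Or.inl (Or.inl (Or.inl h))
          · cases k with
            | zero =>
                push_cast at hx
                rcases hx with hx | hx
                · exact Or.inl (Or.inl (Or.inr (by omega)))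
                · exact Or.inl (Or.inr (by omega))
            | succ k =>
                refine Or.inr ⟨k, by simp at hk; omega, by simpa using hmk, ?_⟩
                push_cast at hx ⊢; omega
      · rw [if_neg hm]
        constructor
        · rintro (h | ⟨k, hk, hmk, hx⟩)
          · exact Or.inl h
          · refine Or.inr ⟨k + 1, by simp; omega, by simpa using hmk, ?_⟩
            push_cast at hx ⊢; omega
        · rintro (h | ⟨k, hk, hmk, hx⟩)
          · exact Or.inl h
          · cases k with
            | zero => exact absurd (by simpa using hmk) hm
            | succ k =>
                refine Or.inr ⟨k, by simp at hk; omega, by simpa using hmk, ?_⟩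
                push_cast at hx ⊢; omega

-- B's filter pass equals pvSpecLines, given a drop set characterised index-wise
theorem pvB_filter (lines : List String) (n : Int) (D : PySem.Set Int) (skip : Bool)
    (hD : ∀ (k : Nat) (hk : k < lines.length),
      ((n + k) ∈ D ↔ (PySem.Str.isIn pvFstabMarker (lines[k]'hk) = true ∨
        (if _h : k = 0 then skip = true
         else PySem.Str.isIn pvFstabMarker (lines[k - 1]'(by omega)) = true)))) :
    ((PySem.List.enumerate lines n).filter (fun p => !(PySem.Set.contains D p.1))).map (·.2)
      = pvSpecLines skip lines := by
  induction lines generalizing n skip with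
  | nil => simp [PySem.List.enumerate_nil, pvSpecLines]
  | cons l t ih =>
      rw [PySem.List.enumerate_cons, List.filter_cons]
      have h0 := hD 0 (by simp)
      simp only [Nat.cast_zero, add_zero] at h0
      simp only [List.getElem_cons_zero] at h0
      rw [dif_pos trivial] at h0
      have hnext : ∀ (k : Nat) (hk : k < t.length),
            ((n + 1 + (k : Int)) ∈ D ↔ (PySem.Str.isIn pvFstabMarker (t[k]'hk) = true ∨
              (if _h : k = 0 then PySem.Str.isIn pvFstabMarker l = true
               else PySem.Str.isIn pvFstabMarker (t[k - 1]'(by omega)) = true))) := by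
        intro k hk
        have h := hD (k + 1) (by simp; omega)
        push_cast at h
        rw [show n + ((k : Int) + 1) = n + 1 + k from by ring] at h
        cases k with
        | zero => simpa using h
        | succ k => simpa using h
      have ihl := ih (n + 1) (PySem.Str.isIn pvFstabMarker l) hnext
      by_cases hm : PySem.Str.isIn pvFstabMarker l = true
      · have hdrop : n ∈ D := h0.mpr (Or.inl hm)
        rw [if_neg (by simp [hdrop])]
        simp only [pvSpecLines, hm, if_pos]
        rw [hm] at ihl; exact ihl
      · have hm' : PySem.Str.isIn pvFstabMarker l = false := by
          cases hh : PySem.Str.isIn pvFstabMarker l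
          · rfl
          · exact absurd hh hm
        rw [hm'] at ihl
        by_cases hs : skip = true
        · have hdrop : n ∈ D := h0.mpr (Or.inr hs)
          rw [if_neg (by simp [hdrop])]
          simp only [pvSpecLines]
          rw [if_neg hm, if_pos hs]
          exact ihl
        · have hkeep : n ∉ D := fun h => by rcases h0.mp h with h | h; exact hm h; exact hs h
          rw [if_pos (by simp [hkeep])]
          simp only [List.map_cons, pvSpecLines]
          rw [if_neg hm, if_neg hs, ihl]

-- ===== VERDICT (by name: the statement is the Claim_ definition above) =====
theorem strip_existing_pawcorder_lines_py_spec : Claim_equal_strip_existing_pawcorder_lines_py := by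
  intro s _
  unfold Spec_strip_existing_pawcorder_lines_py
  unfold strip_existing_pawcorder_lines_py strip_existing_pawcorder_lines_py_alt
  simp only
  congr 1
  rw [pvA_fold]
  rw [pvB_filter (skip := false)]
  · simp
  · intro k hk
    unfold pvDropSet
    rw [pvDrop_mem]
    simp only [PySem.Set.empty]
    constructor
    · rintro (h | ⟨j, hj, hmj, hx⟩)
      · simp at h
      · simp only [zero_add] at hx
        rcases hx with hx | hx
        · have : k = j := by exact_mod_cast hx
          subst this; exact Or.inl hmj
        · have hkj : k = j + 1 := by exact_mod_cast hx
          subst hkj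
          exact Or.inr (by rw [dif_neg (Nat.succ_ne_zero j)]; simpa using hmj)
    · rintro (h | h)
      · exact Or.inr ⟨k, hk, h, Or.inl (by ring)⟩
      · rcases Nat.eq_zero_or_pos k with h0 | h0
        · rw [dif_pos h0] at h; simp at h
        · rw [dif_neg (by omega)] at h
          refine Or.inr ⟨k - 1, by omega, h, Or.inr ?_⟩
          omega
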